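-- pv_equiv track=rewrite | github.com/klinucsd/interagency-tracking-system | utils/standardize_domains.py | map_county_to_code
-- ===== SOURCE A (Python) =====
-- def map_county_to_code(county_name):
--     county_mapping = {
--         "ALA": ["Alameda", "Alameda County", "ALAMEDA"],
--         "ALP": ["Alpine", "Alpine County", "ALPINE"],
--         "AMA": ["Amador", "Amador County", "AMADOR"],
--         "BUT": ["Butte", "Butte County", "BUTTE"],
--         "CAL": ["Calaveras", "Calaveras County", "CALAVERAS"],
--         "COL": ["Colusa", "Colusa County", "COLUSA"],
--         "CC": ["Contra Costa", "Contra Costa County", "CONTRA COSTA"],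
--         "DN": ["Del Norte", "Del Norte County", "DEL NORTE"],
--         "ED": ["El Dorado", "El Dorado County", "EL DORADO"],
--         "FRE": ["Fresno", "Fresno County", "FRESNO"],
--         "GLE": ["Glenn", "Glenn County", "GLENN"],
--         "HUM": ["Humboldt", "Humboldt County", "HUMBOLDT"],
--         "IMP": ["Imperial", "Imperial County", "IMPERIAL"],
--         "INY": ["Inyo", "Inyo County", "INYO"],
--         "KER": ["Kern", "Kern County", "KERN"],
--         "KIN": ["Kings", "Kings County", "KINGS"],
--         "LAK": ["Lake", "Lake County", "LAKE"],
--         "LAS": ["Lassen", "Lassen County", "LASSEN"],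
--         "LA": ["Los Angeles", "Los Angeles County", "LOS ANGELES"],
--         "MAD": ["Madera", "Madera County", "MADERA"],
--         "MRN": ["Marin", "Marin County", "MARIN"],
--         "MPA": ["Mariposa", "Mariposa County", "MARIPOSA"],
--         "MEN": ["Mendocino", "Mendocino County", "MENDOCINO"],
--         "MER": ["Merced", "Merced County", "MERCED"],
--         "MOD": ["Modoc", "Modoc County", "MODOC"],
--         "MON": ["Monterey", "Monterey County", "MONTEREY"],
--         "MNO": ["Mono", "Mono County", "MONO"],
--         "NAP": ["Napa", "Napa County", "NAPA"],
--         "NEV": ["Nevada", "Nevada County", "NEVADA"],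
--         "ORA": ["Orange", "Orange County", "ORANGE"],
--         "PLA": ["Placer", "Placer County", "PLACER"],
--         "PLU": ["Plumas", "Plumas County", "PLUMAS"],
--         "RIV": ["Riverside", "Riverside County", "RIVERSIDE"],
--         "SAC": ["Sacramento", "Sacramento County", "SACRAMENTO"],
--         "SBT": ["San Benito", "San Benito County", "SAN BENITO"],
--         "SBD": ["San Bernardino", "San Bernardino County", "SAN BERNARDINO"],
--         "SD": ["San Diego", "San Diego County", "SAN DIEGO"],
--         "SF": ["San Francisco", "San Francisco County", "SAN FRANCISCO"],
--         "SJ": ["San Joaquin", "San Joaquin County", "SAN JOAQUIN"],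
--         "SLO": ["San Luis Obispo", "San Luis Obispo County", "SAN LUIS OBISPO"],
--         "SM": ["San Mateo", "San Mateo County", "SAN MATEO"],
--         "SB": ["Santa Barbara", "Santa Barbara County", "SANTA BARBARA"],
--         "SCL": ["Santa Clara", "Santa Clara County", "SANTA CLARA"],
--         "SCR": ["Santa Cruz", "Santa Cruz County", "SANTA CRUZ"],
--         "SHA": ["Shasta", "Shasta County", "SHASTA"],
--         "SIE": ["Sierra", "Sierra County", "SIERRA"],
--         "SIS": ["Siskiyou", "Siskiyou County", "SISKIYOU"],
--         "SOL": ["Solano", "Solano County", "SOLANO"],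
--         "SON": ["Sonoma", "Sonoma County", "SONOMA"],
--         "STA": ["Stanislaus", "Stanislaus County", "STANISLAUS"],
--         "SUT": ["Sutter", "Sutter County", "SUTTER"],
--         "TEH": ["Tehama", "Tehama County", "TEHAMA"],
--         "TUO": ["Tuolumne", "Tuolumne County", "TUOLUMNE"],
--         "TRI": ["Trinity", "Trinity County", "TRINITY"],
--         "TUL": ["Tulare", "Tulare County", "TULARE"],
--         "VEN": ["Ventura", "Ventura County", "VENTURA"],
--         "YOL": ["Yolo", "Yolo County", "YOLO"],
--         "YUB": ["Yuba", "Yuba County", "YUBA"],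
--         "NON_SPATIAL": ["Non-Spatial", "Statewide"],
--     }
--     for code, names in county_mapping.items():
--         if county_name == code or county_name in names:
--             return code
--     return None
-- ===== SOURCE B (Python) =====
-- # B: stores only one base name per code and derives the "X County"/upper-case
-- # variants, building a flat reverse index once; NON_SPATIAL is the lone
-- # irregular entry and is handled by a direct membership test.
-- _BASES = {
--     "ALA": "Alameda", "ALP": "Alpine", "AMA": "Amador", "BUT": "Butte",
--     "CAL": "Calaveras", "COL": "Colusa", "CC": "Contra Costa", "DN": "Del Norte",
--     "ED": "El Dorado", "FRE": "Fresno", "GLE": "Glenn", "HUM": "Humboldt",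
--     "IMP": "Imperial", "INY": "Inyo", "KER": "Kern", "KIN": "Kings",
--     "LAK": "Lake", "LAS": "Lassen", "LA": "Los Angeles", "MAD": "Madera",
--     "MRN": "Marin", "MPA": "Mariposa", "MEN": "Mendocino", "MER": "Merced",
--     "MOD": "Modoc", "MON": "Monterey", "MNO": "Mono", "NAP": "Napa",
--     "NEV": "Nevada", "ORA": "Orange", "PLA": "Placer", "PLU": "Plumas",
--     "RIV": "Riverside", "SAC": "Sacramento", "SBT": "San Benito",
--     "SBD": "San Bernardino", "SD": "San Diego", "SF": "San Francisco",
--     "SJ": "San Joaquin", "SLO": "San Luis Obispo", "SM": "San Mateo",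
--     "SB": "Santa Barbara", "SCL": "Santa Clara", "SCR": "Santa Cruz",
--     "SHA": "Shasta", "SIE": "Sierra", "SIS": "Siskiyou", "SOL": "Solano",
--     "SON": "Sonoma", "STA": "Stanislaus", "SUT": "Sutter", "TEH": "Tehama",
--     "TUO": "Tuolumne", "TRI": "Trinity", "TUL": "Tulare", "VEN": "Ventura",
--     "YOL": "Yolo", "YUB": "Yuba",
-- }
--
-- _LOOKUP = {}
-- for _code, _base in _BASES.items():
--     for _key in (_code, _base, _base + " County", _base.upper()):
--         _LOOKUP.setdefault(_key, _code)
--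
--
-- def map_county_to_code(county_name):
--     if county_name in ("NON_SPATIAL", "Non-Spatial", "Statewide"):
--         return "NON_SPATIAL"
--     return _LOOKUP.get(county_name)
-- ===== Notes on version B (the rewrite author's own statement) =====
-- stated objective: simpler
-- what changed: B stores only one base name per code and derives the County-suffixed and upper-case name variants, building a flat reverse index (key -> code, first wins via setdefault) once so the body is a membership test for the irregular NON_SPATIAL entry plus a single dict.get, instead of A's per-call linear scan over a dict of explicit name lists.
import Mathlib
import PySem

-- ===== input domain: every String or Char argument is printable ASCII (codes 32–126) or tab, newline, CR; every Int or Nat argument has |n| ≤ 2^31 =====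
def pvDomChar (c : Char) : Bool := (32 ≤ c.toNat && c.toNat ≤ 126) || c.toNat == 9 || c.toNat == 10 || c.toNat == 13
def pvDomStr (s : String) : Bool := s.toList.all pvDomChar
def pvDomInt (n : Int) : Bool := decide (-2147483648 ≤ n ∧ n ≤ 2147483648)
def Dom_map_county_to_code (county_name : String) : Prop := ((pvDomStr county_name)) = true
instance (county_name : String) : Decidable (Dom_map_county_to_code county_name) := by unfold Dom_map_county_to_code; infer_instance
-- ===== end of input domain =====

-- B keeps only one base name per code, derives the County-suffixed and upper-case variants into a
-- one-time flat reverse index, and handles the irregular NON_SPATIAL entry directly.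

-- ===== PORT A =====
-- A's literal code → name-list table
def pvCountyTable : List (String × List String) := [
  ("ALA", ["Alameda", "Alameda County", "ALAMEDA"]),
  ("ALP", ["Alpine", "Alpine County", "ALPINE"]),
  ("AMA", ["Amador", "Amador County", "AMADOR"]),
  ("BUT", ["Butte", "Butte County", "BUTTE"]),
  ("CAL", ["Calaveras", "Calaveras County", "CALAVERAS"]),
  ("COL", ["Colusa", "Colusa County", "COLUSA"]),
  ("CC", ["Contra Costa", "Contra Costa County", "CONTRA COSTA"]),
  ("DN", ["Del Norte", "Del Norte County", "DEL NORTE"]),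
  ("ED", ["El Dorado", "El Dorado County", "EL DORADO"]),
  ("FRE", ["Fresno", "Fresno County", "FRESNO"]),
  ("GLE", ["Glenn", "Glenn County", "GLENN"]),
  ("HUM", ["Humboldt", "Humboldt County", "HUMBOLDT"]),
  ("IMP", ["Imperial", "Imperial County", "IMPERIAL"]),
  ("INY", ["Inyo", "Inyo County", "INYO"]),
  ("KER", ["Kern", "Kern County", "KERN"]),
  ("KIN", ["Kings", "Kings County", "KINGS"]),
  ("LAK", ["Lake", "Lake County", "LAKE"]),
  ("LAS", ["Lassen", "Lassen County", "LASSEN"]),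
  ("LA", ["Los Angeles", "Los Angeles County", "LOS ANGELES"]),
  ("MAD", ["Madera", "Madera County", "MADERA"]),
  ("MRN", ["Marin", "Marin County", "MARIN"]),
  ("MPA", ["Mariposa", "Mariposa County", "MARIPOSA"]),
  ("MEN", ["Mendocino", "Mendocino County", "MENDOCINO"]),
  ("MER", ["Merced", "Merced County", "MERCED"]),
  ("MOD", ["Modoc", "Modoc County", "MODOC"]),
  ("MON", ["Monterey", "Monterey County", "MONTEREY"]),
  ("MNO", ["Mono", "Mono County", "MONO"]),
  ("NAP", ["Napa", "Napa County", "NAPA"]),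
  ("NEV", ["Nevada", "Nevada County", "NEVADA"]),
  ("ORA", ["Orange", "Orange County", "ORANGE"]),
  ("PLA", ["Placer", "Placer County", "PLACER"]),
  ("PLU", ["Plumas", "Plumas County", "PLUMAS"]),
  ("RIV", ["Riverside", "Riverside County", "RIVERSIDE"]),
  ("SAC", ["Sacramento", "Sacramento County", "SACRAMENTO"]),
  ("SBT", ["San Benito", "San Benito County", "SAN BENITO"]),
  ("SBD", ["San Bernardino", "San Bernardino County", "SAN BERNARDINO"]),
  ("SD", ["San Diego", "San Diego County", "SAN DIEGO"]),
  ("SF", ["San Francisco", "San Francisco County", "SAN FRANCISCO"]),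
  ("SJ", ["San Joaquin", "San Joaquin County", "SAN JOAQUIN"]),
  ("SLO", ["San Luis Obispo", "San Luis Obispo County", "SAN LUIS OBISPO"]),
  ("SM", ["San Mateo", "San Mateo County", "SAN MATEO"]),
  ("SB", ["Santa Barbara", "Santa Barbara County", "SANTA BARBARA"]),
  ("SCL", ["Santa Clara", "Santa Clara County", "SANTA CLARA"]),
  ("SCR", ["Santa Cruz", "Santa Cruz County", "SANTA CRUZ"]),
  ("SHA", ["Shasta", "Shasta County", "SHASTA"]),
  ("SIE", ["Sierra", "Sierra County", "SIERRA"]),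
  ("SIS", ["Siskiyou", "Siskiyou County", "SISKIYOU"]),
  ("SOL", ["Solano", "Solano County", "SOLANO"]),
  ("SON", ["Sonoma", "Sonoma County", "SONOMA"]),
  ("STA", ["Stanislaus", "Stanislaus County", "STANISLAUS"]),
  ("SUT", ["Sutter", "Sutter County", "SUTTER"]),
  ("TEH", ["Tehama", "Tehama County", "TEHAMA"]),
  ("TUO", ["Tuolumne", "Tuolumne County", "TUOLUMNE"]),
  ("TRI", ["Trinity", "Trinity County", "TRINITY"]),
  ("TUL", ["Tulare", "Tulare County", "TULARE"]),
  ("VEN", ["Ventura", "Ventura County", "VENTURA"]),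
  ("YOL", ["Yolo", "Yolo County", "YOLO"]),
  ("YUB", ["Yuba", "Yuba County", "YUBA"]),
  ("NON_SPATIAL", ["Non-Spatial", "Statewide"])
]

-- A: iterate the dict items in order; return code on the first entry whose code or name list matches.
def pvScanA : List (String × List String) → String → Option String
  | [], _ => none
  | (code, names) :: rest, x =>
      if x == code || names.contains x then some code else pvScanA rest x

def map_county_to_code (county_name : String) : Option String :=
  pvScanA pvCountyTable county_name

-- ===== PORT B =====
-- B's table: one base name per code (NON_SPATIAL is not here; it is irregular)
def pvBaseTable : List (String × String) := [
  ("ALA", "Alameda"), ("ALP", "Alpine"), ("AMA", "Amador"), ("BUT", "Butte"),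
  ("CAL", "Calaveras"), ("COL", "Colusa"), ("CC", "Contra Costa"), ("DN", "Del Norte"),
  ("ED", "El Dorado"), ("FRE", "Fresno"), ("GLE", "Glenn"), ("HUM", "Humboldt"),
  ("IMP", "Imperial"), ("INY", "Inyo"), ("KER", "Kern"), ("KIN", "Kings"),
  ("LAK", "Lake"), ("LAS", "Lassen"), ("LA", "Los Angeles"), ("MAD", "Madera"),
  ("MRN", "Marin"), ("MPA", "Mariposa"), ("MEN", "Mendocino"), ("MER", "Merced"),
  ("MOD", "Modoc"), ("MON", "Monterey"), ("MNO", "Mono"), ("NAP", "Napa"),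
  ("NEV", "Nevada"), ("ORA", "Orange"), ("PLA", "Placer"), ("PLU", "Plumas"),
  ("RIV", "Riverside"), ("SAC", "Sacramento"), ("SBT", "San Benito"),
  ("SBD", "San Bernardino"), ("SD", "San Diego"), ("SF", "San Francisco"),
  ("SJ", "San Joaquin"), ("SLO", "San Luis Obispo"), ("SM", "San Mateo"),
  ("SB", "Santa Barbara"), ("SCL", "Santa Clara"), ("SCR", "Santa Cruz"),
  ("SHA", "Shasta"), ("SIE", "Sierra"), ("SIS", "Siskiyou"), ("SOL", "Solano"),
  ("SON", "Sonoma"), ("STA", "Stanislaus"), ("SUT", "Sutter"), ("TEH", "Tehama"),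
  ("TUO", "Tuolumne"), ("TRI", "Trinity"), ("TUL", "Tulare"), ("VEN", "Ventura"),
  ("YOL", "Yolo"), ("YUB", "Yuba")
]

-- the four lookup keys (code, base, base + " County", base.upper()) derived per entry
def pvVariants (code base : String) : List String :=
  [code, base, base ++ " County", PySem.Str.upper base]

-- one-time reverse index built with setdefault (first occurrence wins)
def pvLookup : PySem.Dict String String :=
  pvBaseTable.foldl
    (fun d p => (pvVariants p.1 p.2).foldl (fun d k => d.setdefault k p.1) d)
    PySem.Dict.empty

def map_county_to_code_alt (county_name : String) : Option String :=
  if county_name == "NON_SPATIAL" || county_name == "Non-Spatial" || county_name == "Statewide"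
  then some "NON_SPATIAL"
  else pvLookup.get? county_name

-- ===== PRECONDITION & SPEC =====
def Spec_map_county_to_code (county_name : String) (out : Option String) : Prop := out = map_county_to_code_alt county_name
instance (county_name : String) (out : Option String) : Decidable (Spec_map_county_to_code county_name out) := by unfold Spec_map_county_to_code; infer_instance

-- ===== CLAIM (what is proved, stated in full; the proofs are below) =====
def Claim_equal_map_county_to_code : Prop := ∀ (county_name : String), Dom_map_county_to_code county_name → Spec_map_county_to_code county_name (map_county_to_code county_name)

-- ===== LEMMAS AND PROOFS =====

-- scanning an appended table = scan the first part, else the second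
theorem pv_scan_append (l₁ l₂ : List (String × List String)) (x : String) :
    pvScanA (l₁ ++ l₂) x = (pvScanA l₁ x).or (pvScanA l₂ x) := by
  induction l₁ with
  | nil => simp [pvScanA]
  | cons p rest ih =>
    obtain ⟨c, ns⟩ := p
    by_cases h : x = c ∨ x ∈ ns <;> simp [pvScanA, h, ih]

-- lookup after a setdefault loop over a key list: existing bindings win, else first key match
theorem pv_get_setdefault_fold (keys : List String) (c : String)
    (d : PySem.Dict String String) (x : String) :
    (keys.foldl (fun d k => d.setdefault k c) d).get? x
      = (d.get? x).or (if keys.contains x then some c else none) := by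
  induction keys generalizing d with
  | nil => simp
  | cons k ks ih =>
    simp only [List.foldl_cons, ih]
    by_cases hx : x = k
    · subst hx
      have h1 : (d.setdefault x c).get? x = (d.get? x).or (some c) := by
        rw [PySem.Dict.get?_setdefault_self]
        cases d.get? x <;> rfl
      simp [h1]
    · rw [PySem.Dict.get?_setdefault_of_ne _ _ hx]
      simp [hx]

-- B's derived variant lists, viewed as an A-style table
def pvDerivedTable : List (String × List String) :=
  pvBaseTable.map (fun p => (p.1, (pvVariants p.1 p.2).tail))

-- lookup in the index built from the base table = A's first-match scan of the derived table
theorem pv_get_build_eq_scan (tbl : List (String × String))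
    (d : PySem.Dict String String) (x : String) :
    (tbl.foldl (fun d p => (pvVariants p.1 p.2).foldl (fun d k => d.setdefault k p.1) d) d).get? x
      = (d.get? x).or (pvScanA (tbl.map (fun p => (p.1, (pvVariants p.1 p.2).tail))) x) := by
  induction tbl generalizing d with
  | nil => simp [pvScanA]
  | cons p rest ih =>
    obtain ⟨c, b⟩ := p
    rw [List.foldl_cons, ih, pv_get_setdefault_fold, Option.or_assoc]
    congr 1
    by_cases hc : x = c ∨ x ∈ (pvVariants c b).tail
    · have hm : x ∈ pvVariants c b := by
        simp only [pvVariants] at hc ⊢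
        simp at hc ⊢
        tauto
      simp [pvScanA, hc, hm]
    · have hm : x ∉ pvVariants c b := by
        simp only [pvVariants] at hc ⊢
        simp at hc ⊢
        tauto
      simp [pvScanA, hc, hm]

-- A's literal table is exactly B's derived table plus the NON_SPATIAL entry
theorem pv_table_split :
    pvCountyTable = pvDerivedTable ++ [("NON_SPATIAL", ["Non-Spatial", "Statewide"])] := by
  decide

-- ===== VERDICT (by name: the statement is the Claim_ definition above) =====
theorem map_county_to_code_spec : Claim_equal_map_county_to_code := by
  intro x _
  show map_county_to_code x = map_county_to_code_alt x
  rw [map_county_to_code, map_county_to_code_alt, pv_table_split, pv_scan_append]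
  by_cases h : (x == "NON_SPATIAL" || x == "Non-Spatial" || x == "Statewide") = true
  · rcases (by simpa using h : (x = "NON_SPATIAL" ∨ x = "Non-Spatial") ∨ x = "Statewide")
      with (h' | h') | h' <;> subst h' <;> decide
  · simp only [h]
    have htail : pvScanA [("NON_SPATIAL", ["Non-Spatial", "Statewide"])] x = none := by
      simp at h
      simp [pvScanA, h]
    rw [htail, pvLookup, pv_get_build_eq_scan]
    simp [pvDerivedTable]
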